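-- pv_equiv track=rewrite | github.com/Sallyrideauto/codetree-TILs | 240809/최대 최소간의 차/difference-between-maximum-and-minimum.py | min_cost_to_limit_diff
-- ===== SOURCE A (Python) =====
-- def min_cost_to_limit_diff(n, k, numbers):
--     # 수들을 정렬
--     numbers.sort()
--
--     min_cost = float('inf')
--
--     # 가능한 최소값과 최대값의 범위 설정
--     min_val = numbers[0]
--     max_val = numbers[-1]
--
--     # 가능한 값의 범위에서 시작하여 모든 구간을 검사
--     for lower_bound in range(min_val, max_val + 1):
--         upper_bound = lower_bound + k
--
--         # 현재 구간에 대해 비용을 계산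
--         cost = 0
--         for num in numbers:
--             if num < lower_bound:
--                 cost += lower_bound - num
--             elif num > upper_bound:
--                 cost += num - upper_bound
--
--         # 최소 비용 업데이트
--         min_cost = min(min_cost, cost)
--
--     return min_cost
-- ===== SOURCE B (Python) =====
-- def min_cost_to_limit_diff(n, k, numbers):
--     # Evaluate the piecewise-linear cost only at breakpoint candidates
--     # (num, num+1, num-k, clamped into [lo, hi]) instead of every value in range.
--     lo = min(numbers)
--     hi = max(numbers)
--
--     def clamp(v):
--         return lo if v < lo else (hi if v > hi else v)
--
--     cands = {lo, hi}
--     for x in numbers: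
--         cands.add(x)
--         cands.add(clamp(x + 1))
--         cands.add(clamp(x - k))
--
--     def cost(L):
--         return sum(L - x if x < L else max(0, x - (L + k)) for x in numbers)
--
--     return min(cost(c) for c in cands)
-- ===== Notes on version B (the rewrite author's own statement) =====
-- stated objective: alternative
-- what changed: Instead of scanning every integer lower bound between min and max (A), B evaluates the piecewise-linear clamp cost only at the O(n) breakpoint candidates (x, x+1, x-k clamped into [min,max]) and takes the minimum over that set.
import Mathlib
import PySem

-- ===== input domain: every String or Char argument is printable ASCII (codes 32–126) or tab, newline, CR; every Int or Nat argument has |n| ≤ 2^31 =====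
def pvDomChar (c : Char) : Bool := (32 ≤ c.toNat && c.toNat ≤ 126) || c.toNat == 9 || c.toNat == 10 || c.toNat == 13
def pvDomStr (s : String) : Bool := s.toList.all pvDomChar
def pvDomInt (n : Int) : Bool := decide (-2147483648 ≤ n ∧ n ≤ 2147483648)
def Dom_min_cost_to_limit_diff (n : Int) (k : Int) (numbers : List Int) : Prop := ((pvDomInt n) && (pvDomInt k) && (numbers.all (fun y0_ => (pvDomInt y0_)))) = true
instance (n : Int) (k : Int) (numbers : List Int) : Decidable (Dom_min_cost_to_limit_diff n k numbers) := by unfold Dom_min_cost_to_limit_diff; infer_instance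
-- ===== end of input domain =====

-- B evaluates the piecewise-linear clamp cost only at its O(n) breakpoint candidates instead of at
-- every integer between min and max (A). Note: A sorts `numbers` in place (caller-observable
-- mutation); B does not mutate — the equivalence proved here is about the return value.

-- ===== PORT A =====
def min_cost_to_limit_diff (n : Int) (k : Int) (numbers : List Int) : Int :=
  -- numbers.sort() — in-place sort; the rest of A reads the sorted list
  let s := PySem.List.sorted numbers (fun x => x)
  match PySem.List.pyGet? s 0, PySem.List.pyGet? s (-1) with
  | some min_val, some max_val =>
      ((PySem.List.pyRange min_val (max_val + 1)).foldl
        (fun (min_cost : Option Int) lower_bound =>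
          let upper_bound := lower_bound + k
          let cost := s.foldl (fun cost num =>
            if num < lower_bound then cost + (lower_bound - num)
            else if num > upper_bound then cost + (num - upper_bound)
            else cost) 0
          some (match min_cost with
                | none => cost            -- min(float('inf'), cost) = cost
                | some m => min m cost)) none).getD 0
  | _, _ => 0  -- numbers[0] raises IndexError on the empty list: excluded by Pre_

-- ===== PORT B =====
def pvClamp (lo hi v : Int) : Int := if v < lo then lo else if v > hi then hi else v

def min_cost_to_limit_diff_alt (n : Int) (k : Int) (numbers : List Int) : Int :=
  match PySem.List.min? numbers (fun x => x) with
  | none => 0  -- min([]) raises ValueError on the empty list: excluded by Pre_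
  | some lo =>
    match PySem.List.max? numbers (fun x => x) with
    | none => 0
    | some hi =>
      let cands : PySem.Set Int := numbers.foldl
        (fun cands x =>
          PySem.Set.add (PySem.Set.add (PySem.Set.add cands x)
            (pvClamp lo hi (x + 1))) (pvClamp lo hi (x - k)))
        (PySem.Set.ofList [lo, hi])
      let cost := fun (L : Int) =>
        (numbers.map (fun x => if x < L then L - x else max 0 (x - (L + k)))).sum
      (PySem.List.min? (cands.map cost) (fun c => c)).getD 0

-- ===== PRECONDITION & SPEC =====
-- Pre_ excludes only the empty list, on which A raises IndexError (numbers[0]) and B raises ValueError (min([])).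
def Pre_min_cost_to_limit_diff (n : Int) (k : Int) (numbers : List Int) : Prop := numbers ≠ []
instance (n : Int) (k : Int) (numbers : List Int) : Decidable (Pre_min_cost_to_limit_diff n k numbers) := by unfold Pre_min_cost_to_limit_diff; infer_instance
def pvWitness_min_cost_to_limit_diff : Int × Int × List Int := (3, 2, [1, 5, 3])

def Spec_min_cost_to_limit_diff (n : Int) (k : Int) (numbers : List Int) (out : Int) : Prop := out = min_cost_to_limit_diff_alt n k numbers
instance (n : Int) (k : Int) (numbers : List Int) (out : Int) : Decidable (Spec_min_cost_to_limit_diff n k numbers out) := by unfold Spec_min_cost_to_limit_diff; infer_instance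

-- ===== CLAIM (what is proved, stated in full; the proofs are below) =====
def Claim_equal_min_cost_to_limit_diff : Prop := ∀ (n : Int) (k : Int) (numbers : List Int), Dom_min_cost_to_limit_diff n k numbers → Pre_min_cost_to_limit_diff n k numbers → Spec_min_cost_to_limit_diff n k numbers (min_cost_to_limit_diff n k numbers)

-- ===== LEMMAS AND PROOFS =====

-- the per-element clamp cost and the total cost function both programs minimise
def pvTerm (k L x : Int) : Int := if x < L then L - x else max 0 (x - (L + k))
def pvF (k : Int) (numbers : List Int) (L : Int) : Int :=
  (numbers.map (fun x => if x < L then L - x else max 0 (x - (L + k)))).sum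

lemma pvF_eq_sum_term (k : Int) (numbers : List Int) (L : Int) :
    pvF k numbers L = (numbers.map (pvTerm k L)).sum := rfl

-- away from the three breakpoints of x, the per-element cost is locally linear in L
lemma pvTerm_lin (k x L : Int) (h1 : L ≠ x - k) (h2 : L ≠ x) (h3 : L ≠ x + 1) :
    pvTerm k (L + 1) x + pvTerm k (L - 1) x = 2 * pvTerm k L x := by
  simp only [pvTerm, max_def]
  split_ifs <;> omega

lemma pvF_lin (k : Int) (numbers : List Int) (L : Int)
    (h : ∀ x ∈ numbers, L ≠ x - k ∧ L ≠ x ∧ L ≠ x + 1) :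
    pvF k numbers (L + 1) + pvF k numbers (L - 1) = 2 * pvF k numbers L := by
  simp only [pvF_eq_sum_term]
  induction numbers with
  | nil => simp
  | cons a t ih =>
      simp only [List.map_cons, List.sum_cons]
      have ha := h a (by simp)
      have := pvTerm_lin k a L ha.1 ha.2.1 ha.2.2
      have ht := ih (fun x hx => h x (by simp [hx]))
      linarith

-- walk left along a locally linear function until a candidate is hit
lemma pvWalkL (f : Int → Int) (P : Int → Prop) (m M : Int) (hPm : P m)
    (hlin : ∀ L, m < L → L < M → ¬ P L → f (L + 1) + f (L - 1) = 2 * f L) :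
    ∀ (d : Nat) (L : Int), m ≤ L → L ≤ M → (L - m).toNat ≤ d →
      (P L ∨ f (L - 1) ≤ f L) → ∃ c, P c ∧ m ≤ c ∧ c ≤ M ∧ f c ≤ f L := by
  intro d
  induction d with
  | zero =>
      intro L hm hM hd _
      have : L = m := by omega
      subst this
      exact ⟨L, hPm, le_refl L, hM, le_refl _⟩
  | succ d ih =>
      intro L hm hM hd hinv
      by_cases hPL : P L
      · exact ⟨L, hPL, hm, hM, le_refl _⟩
      · have hLm : L ≠ m := fun h => hPL (h ▸ hPm)
        have hmL : m < L := lt_of_le_of_ne hm (Ne.symm hLm)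
        have hstep : f (L - 1) ≤ f L := hinv.resolve_left hPL
        have hinv' : P (L - 1) ∨ f (L - 1 - 1) ≤ f (L - 1) := by
          by_cases hP1 : P (L - 1)
          · exact Or.inl hP1
          · right
            have hm1 : m < L - 1 := by
              rcases lt_or_eq_of_le (by omega : m ≤ L - 1) with h | h
              · exact h
              · exact absurd (h ▸ hPm) hP1
            have := hlin (L - 1) hm1 (by omega) hP1
            have : f (L - 1 + 1) + f (L - 1 - 1) = 2 * f (L - 1) := this
            have hL : f L + f (L - 1 - 1) = 2 * f (L - 1) := by
              have e : L - 1 + 1 = L := by omega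
              rwa [e] at this
            linarith
        obtain ⟨c, hc1, hc2, hc3, hc4⟩ := ih (L - 1) (by omega) (by omega) (by omega) hinv'
        exact ⟨c, hc1, hc2, hc3, le_trans hc4 hstep⟩

-- symmetric walk to the right
lemma pvWalkR (f : Int → Int) (P : Int → Prop) (m M : Int) (hPM : P M)
    (hlin : ∀ L, m < L → L < M → ¬ P L → f (L + 1) + f (L - 1) = 2 * f L) :
    ∀ (d : Nat) (L : Int), m ≤ L → L ≤ M → (M - L).toNat ≤ d →
      (P L ∨ f (L + 1) ≤ f L) → ∃ c, P c ∧ m ≤ c ∧ c ≤ M ∧ f c ≤ f L := by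
  intro d
  induction d with
  | zero =>
      intro L hm hM hd _
      have : L = M := by omega
      subst this
      exact ⟨L, hPM, hm, le_refl _, le_refl _⟩
  | succ d ih =>
      intro L hm hM hd hinv
      by_cases hPL : P L
      · exact ⟨L, hPL, hm, hM, le_refl _⟩
      · have hLM : L ≠ M := fun h => hPL (h ▸ hPM)
        have hML : L < M := lt_of_le_of_ne hM hLM
        have hstep : f (L + 1) ≤ f L := hinv.resolve_left hPL
        have hinv' : P (L + 1) ∨ f (L + 1 + 1) ≤ f (L + 1) := by
          by_cases hP1 : P (L + 1)
          · exact Or.inl hP1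
          · right
            have hM1 : L + 1 < M := by
              rcases lt_or_eq_of_le (by omega : L + 1 ≤ M) with h | h
              · exact h
              · exact absurd (h ▸ hPM) hP1
            have := hlin (L + 1) (by omega) hM1 hP1
            have hL : f (L + 1 + 1) + f L = 2 * f (L + 1) := by
              have e : L + 1 - 1 = L := by omega
              rwa [e] at this
            linarith
        obtain ⟨c, hc1, hc2, hc3, hc4⟩ := ih (L + 1) (by omega) (by omega) (by omega) hinv'
        exact ⟨c, hc1, hc2, hc3, le_trans hc4 hstep⟩

lemma pvWalk (f : Int → Int) (P : Int → Prop) (m M : Int) (hPm : P m) (hPM : P M)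
    (hlin : ∀ L, m < L → L < M → ¬ P L → f (L + 1) + f (L - 1) = 2 * f L) :
    ∀ L, m ≤ L → L ≤ M → ∃ c, P c ∧ m ≤ c ∧ c ≤ M ∧ f c ≤ f L := by
  intro L hm hM
  by_cases hPL : P L
  · exact ⟨L, hPL, hm, hM, le_refl _⟩
  · have hmL : m < L := lt_of_le_of_ne hm (fun h => hPL (h ▸ hPm))
    have hLM : L < M := lt_of_le_of_ne hM (fun h => hPL (h ▸ hPM))
    have heq := hlin L hmL hLM hPL
    rcases le_total (f (L - 1)) (f L) with h | h
    · exact pvWalkL f P m M hPm hlin (L - m).toNat L hm hM (by omega) (Or.inr h)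
    · have h' : f (L + 1) ≤ f L := by linarith
      exact pvWalkR f P m M hPM hlin (M - L).toNat L hm hM (by omega) (Or.inr h')

-- characterisation of A's running-minimum fold (Option Int accumulator; none = float('inf'))
lemma pvFoldMin_some (g : Int → Int) :
    ∀ (r : List Int) (a : Int),
      ∃ v, r.foldl (fun acc L => some (match acc with | none => g L | some m => min m (g L))) (some a) = some v ∧
        (v = a ∨ ∃ L ∈ r, v = g L) ∧ v ≤ a ∧ ∀ L ∈ r, v ≤ g L := by
  intro r
  induction r with
  | nil => intro a; exact ⟨a, rfl, Or.inl rfl, le_refl _, by simp⟩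
  | cons b t ih =>
      intro a
      obtain ⟨v, hfold, hmem, hle, hall⟩ := ih (min a (g b))
      refine ⟨v, hfold, ?_, ?_, ?_⟩
      · rcases hmem with h | ⟨L, hL, hv⟩
        · rcases le_total a (g b) with hab | hab
          · exact Or.inl (by simp [h, min_eq_left hab])
          · exact Or.inr ⟨b, by simp, by simp [h, min_eq_right hab]⟩
        · exact Or.inr ⟨L, by simp [hL], hv⟩
      · exact le_trans hle (min_le_left _ _)
      · intro L hL
        rcases List.mem_cons.mp hL with h | h
        · exact h ▸ le_trans hle (min_le_right _ _)
        · exact hall L h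
lemma pvFoldMin_none (g : Int → Int) (r : List Int) (hr : r ≠ []) :
    ∃ v, r.foldl (fun acc L => some (match acc with | none => g L | some m => min m (g L))) none = some v ∧
      (∃ L ∈ r, v = g L) ∧ ∀ L ∈ r, v ≤ g L := by
  cases r with
  | nil => exact absurd rfl hr
  | cons b t =>
      obtain ⟨v, hfold, hmem, hle, hall⟩ := pvFoldMin_some g t (g b)
      refine ⟨v, hfold, ?_, ?_⟩
      · rcases hmem with h | ⟨L, hL, hv⟩
        · exact ⟨b, by simp, h⟩
        · exact ⟨L, by simp [hL], hv⟩
      · intro L hL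
        rcases List.mem_cons.mp hL with h | h
        · exact h ▸ hle
        · exact hall L h

-- membership in B's candidate set
lemma pvMemCands (k lo hi : Int) :
    ∀ (numbers : List Int) (s : List Int) (y : Int),
      y ∈ numbers.foldl (fun cands x =>
          PySem.Set.add (PySem.Set.add (PySem.Set.add cands x)
            (pvClamp lo hi (x + 1))) (pvClamp lo hi (x - k))) s ↔
        y ∈ s ∨ ∃ x ∈ numbers, y = x ∨ y = pvClamp lo hi (x + 1) ∨ y = pvClamp lo hi (x - k) := by
  intro numbers
  induction numbers with
  | nil => intro s y; simp
  | cons a t ih =>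
      intro s y
      simp only [List.foldl_cons, ih, PySem.Set.mem_add, List.mem_cons]
      aesop

lemma pvClamp_bounds (lo hi v : Int) (h : lo ≤ hi) :
    lo ≤ pvClamp lo hi v ∧ pvClamp lo hi v ≤ hi := by
  simp only [pvClamp]; split_ifs <;> omega

-- A's inner loop over the sorted list computes pvF
lemma pvCostA_eq (k L : Int) (numbers : List Int) :
    (PySem.List.sorted numbers (fun x => x)).foldl (fun cost num =>
        if num < L then cost + (L - num)
        else if num > L + k then cost + (num - (L + k))
        else cost) 0 = pvF k numbers L := by
  rw [PySem.List.foldl_congr_mem _ _ (fun acc x => acc + pvTerm k L x) 0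
    (by
      intro acc x _
      simp only [pvTerm, max_def]
      split_ifs <;> omega)]
  rw [PySem.List.foldl_add]
  rw [pvF_eq_sum_term]
  have hperm := (PySem.List.sorted_perm numbers (fun x => x) false).map (pvTerm k L)
  simpa using hperm.sum_eq

-- numbers[0] of the sorted list is min(numbers)
lemma pvSortedHead (numbers : List Int) (m : Int)
    (hm : PySem.List.min? numbers (fun x => x) = some m) :
    PySem.List.pyGet? (PySem.List.sorted numbers (fun x => x)) 0 = some m := by
  have hne : numbers ≠ [] := by
    intro h; rw [h] at hm; simp [PySem.List.min?] at hm
  have hperm := PySem.List.sorted_perm numbers (fun x => x) false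
  have hsne : PySem.List.sorted numbers (fun x => x) ≠ [] := by
    intro h; exact hne ((PySem.List.sorted_eq_nil_iff numbers (fun x => x) false).mp h)
  have hlen : 0 < (PySem.List.sorted numbers (fun x => x)).length :=
    List.length_pos_iff.mpr hsne
  have hlen2 : 0 < numbers.length := List.length_pos_iff.mpr hne
  have hget : PySem.List.pyGet? (PySem.List.sorted numbers (fun x => x)) 0 =
      some (PySem.List.sorted numbers (fun x => x))[0] := by
    simp [PySem.List.pyGet?, PySem.List.pyIdx?, hlen2]
  rw [hget]
  have h1 : m ≤ (PySem.List.sorted numbers (fun x => x))[0] := by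
    exact PySem.List.min?_isMin hm _ (hperm.mem_iff.mp (List.getElem_mem hlen))
  have h2 : (PySem.List.sorted numbers (fun x => x))[0] ≤ m := by
    have hmem : m ∈ PySem.List.sorted numbers (fun x => x) :=
      hperm.mem_iff.mpr (PySem.List.min?_mem hm)
    obtain ⟨q, hq, hqm⟩ := List.mem_iff_getElem.mp hmem
    calc (PySem.List.sorted numbers (fun x => x))[0]
        ≤ (PySem.List.sorted numbers (fun x => x))[q] :=
          PySem.List.sorted_id_getElem_mono numbers (Nat.zero_le q) hq
      _ = m := hqm
  exact congrArg some (le_antisymm h2 h1)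

-- numbers[-1] of the sorted list is max(numbers)
lemma pvSortedLast (numbers : List Int) (M : Int)
    (hM : PySem.List.max? numbers (fun x => x) = some M) :
    PySem.List.pyGet? (PySem.List.sorted numbers (fun x => x)) (-1) = some M := by
  have hne : numbers ≠ [] := by
    intro h; rw [h] at hM; simp [PySem.List.max?] at hM
  have hperm := PySem.List.sorted_perm numbers (fun x => x) false
  have hsne : PySem.List.sorted numbers (fun x => x) ≠ [] := by
    intro h; exact hne ((PySem.List.sorted_eq_nil_iff numbers (fun x => x) false).mp h)
  have hlen : 0 < (PySem.List.sorted numbers (fun x => x)).length :=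
    List.length_pos_iff.mpr hsne
  set s := PySem.List.sorted numbers (fun x => x) with hs
  have hidx : s.length - 1 < s.length := by omega
  have hget : PySem.List.pyGet? s (-1) = some s[s.length - 1] := by
    simp only [PySem.List.pyGet?, PySem.List.pyIdx?]
    have h0 : ¬ (0 : Int) ≤ -1 := by omega
    have h1 : -(s.length : Int) ≤ -1 := by omega
    simp [h1, List.getElem?_eq_getElem hidx]
  rw [hget]
  have h1 : s[s.length - 1] ≤ M :=
    PySem.List.max?_isMax hM _ (hperm.mem_iff.mp (List.getElem_mem hidx))
  have h2 : M ≤ s[s.length - 1] := by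
    have hmem : M ∈ s := hperm.mem_iff.mpr (PySem.List.max?_mem hM)
    obtain ⟨q, hq, hqM⟩ := List.mem_iff_getElem.mp hmem
    calc M = s[q] := hqM.symm
      _ ≤ s[s.length - 1] := PySem.List.sorted_id_getElem_mono numbers (by omega) hidx
  exact congrArg some (le_antisymm h1 h2)

-- ===== VERDICT (by name: the statement is the Claim_ definition above) =====
theorem min_cost_to_limit_diff_spec : Claim_equal_min_cost_to_limit_diff := by
  intro n k numbers _hdom hpre
  unfold Spec_min_cost_to_limit_diff
  rcases hlo : PySem.List.min? numbers (fun x => x) with _ | lo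
  · exact absurd ((PySem.List.min?_eq_none_iff numbers _).mp hlo) hpre
  rcases hhi : PySem.List.max? numbers (fun x => x) with _ | hi
  · exact absurd ((PySem.List.max?_eq_none_iff numbers _).mp hhi) hpre
  have hhiMem := PySem.List.max?_mem hhi
  have hloMin := PySem.List.min?_isMin hlo
  have hhiMax := PySem.List.max?_isMax hhi
  have hlohi : lo ≤ hi := hloMin hi hhiMem
  have hA : min_cost_to_limit_diff n k numbers =
      ((PySem.List.pyRange lo (hi + 1)).foldl
        (fun (acc : Option Int) L =>
          some (match acc with
                | none => pvF k numbers L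
                | some m => min m (pvF k numbers L))) none).getD 0 := by
    simp only [min_cost_to_limit_diff, pvSortedHead numbers lo hlo, pvSortedLast numbers hi hhi]
    congr 1
    apply PySem.List.foldl_congr_mem
    intro acc L _
    rw [pvCostA_eq]
  have hB : min_cost_to_limit_diff_alt n k numbers =
      (PySem.List.min?
        ((numbers.foldl (fun cands x =>
            PySem.Set.add (PySem.Set.add (PySem.Set.add cands x)
              (pvClamp lo hi (x + 1))) (pvClamp lo hi (x - k)))
          (PySem.Set.ofList [lo, hi])).map (pvF k numbers)) (fun c => c)).getD 0 := by
    simp only [min_cost_to_limit_diff_alt, hlo, hhi]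
    rfl
  rw [hA, hB]
  set C : PySem.Set Int := numbers.foldl (fun cands x =>
      PySem.Set.add (PySem.Set.add (PySem.Set.add cands x)
        (pvClamp lo hi (x + 1))) (pvClamp lo hi (x - k)))
    (PySem.Set.ofList [lo, hi]) with hCdef
  have hmemC : ∀ y, y ∈ C ↔ y ∈ PySem.Set.ofList [lo, hi] ∨
      ∃ x ∈ numbers, y = x ∨ y = pvClamp lo hi (x + 1) ∨ y = pvClamp lo hi (x - k) := by
    intro y; rw [hCdef]; exact pvMemCands k lo hi numbers _ y
  have hloC : lo ∈ C := (hmemC lo).mpr (Or.inl (by simp [PySem.Set.mem_ofList]))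
  have hhiC : hi ∈ C := (hmemC hi).mpr (Or.inl (by simp [PySem.Set.mem_ofList]))
  have hCb : ∀ y ∈ C, lo ≤ y ∧ y ≤ hi := by
    intro y hy
    rcases (hmemC y).mp hy with h | ⟨x, hx, h⟩
    · have hy2 : y ∈ [lo, hi] := (PySem.Set.mem_ofList _ _).mp h
      rcases List.mem_cons.mp hy2 with rfl | hy3
      · exact ⟨le_refl _, hlohi⟩
      · rcases List.mem_cons.mp hy3 with rfl | hy4
        · exact ⟨hlohi, le_refl _⟩
        · simp at hy4
    · have hx1 := hloMin x hx
      have hx2 := hhiMax x hx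
      rcases h with rfl | rfl | rfl
      · exact ⟨hx1, hx2⟩
      · exact pvClamp_bounds lo hi (x + 1) hlohi
      · exact pvClamp_bounds lo hi (x - k) hlohi
  have hrne : PySem.List.pyRange lo (hi + 1) ≠ [] :=
    List.ne_nil_of_mem (PySem.List.mem_pyRange_one.mpr ⟨le_refl _, by omega⟩)
  obtain ⟨vA, hfold, ⟨L₀, hL₀r, hvA⟩, hAmin⟩ := pvFoldMin_none (pvF k numbers) _ hrne
  have hmapne : C.map (pvF k numbers) ≠ [] :=
    List.ne_nil_of_mem (List.mem_map_of_mem hloC)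
  rcases hmin : PySem.List.min? (C.map (pvF k numbers)) (fun c => c) with _ | vB
  · exact absurd ((PySem.List.min?_eq_none_iff _ _).mp hmin) hmapne
  obtain ⟨c₂, hc₂C, hc₂⟩ := List.mem_map.mp (PySem.List.min?_mem hmin)
  have hvBmin := PySem.List.min?_isMin hmin
  have hlin : ∀ L, lo < L → L < hi → ¬ (L ∈ C) →
      pvF k numbers (L + 1) + pvF k numbers (L - 1) = 2 * pvF k numbers L := by
    intro L h1 h2 hnC
    apply pvF_lin
    intro x hx
    refine ⟨?_, ?_, ?_⟩
    · intro heq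
      refine hnC ((hmemC _).mpr (Or.inr ⟨x, hx, Or.inr (Or.inr ?_)⟩))
      simp only [pvClamp]; split_ifs <;> omega
    · intro heq
      exact hnC ((hmemC _).mpr (Or.inr ⟨x, hx, Or.inl heq⟩))
    · intro heq
      refine hnC ((hmemC _).mpr (Or.inr ⟨x, hx, Or.inr (Or.inl ?_)⟩))
      simp only [pvClamp]; split_ifs <;> omega
  have h1 : vB ≤ vA := by
    have hL₀ := PySem.List.mem_pyRange_one.mp hL₀r
    obtain ⟨c, hcC, _, _, hfc⟩ :=
      pvWalk (pvF k numbers) (· ∈ C) lo hi hloC hhiC hlin L₀ hL₀.1 (by omega)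
    have hle := hvBmin (pvF k numbers c) (List.mem_map_of_mem hcC)
    rw [hvA]
    exact le_trans hle hfc
  have h2 : vA ≤ vB := by
    obtain ⟨hclo, hchi⟩ := hCb c₂ hc₂C
    rw [← hc₂]
    exact hAmin c₂ (PySem.List.mem_pyRange_one.mpr ⟨hclo, by omega⟩)
  rw [hfold]
  simp [le_antisymm h1 h2]
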